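-- pv_equiv track=rewrite | github.com/Luquinharx/KingCrow | backend/scraper_ready.py | find_all_time_loot_index
-- ===== SOURCE A (Python) =====
-- def find_all_time_loot_index(headers):
--     for i, h in enumerate(headers):
--         if "all" in h and "loot" in h:
--             return i
--         if "all time" in h and "loot" in h:
--             return i
--     for i, h in enumerate(headers):
--         if "all time" in h or ("all" in h and ("loot" in h or "loots" in h)):
--             return i
--     return None
-- ===== SOURCE B (Python) =====
-- def find_all_time_loot_index(headers):
--     fallback = None
--     for i, h in enumerate(headers):
--         if "all" in h and "loot" in h:
--             return i
--         if fallback is None and "all time" in h: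
--             fallback = i
--     return fallback
-- ===== Notes on version B (the rewrite author's own statement) =====
-- stated objective: simpler
-- what changed: Replaces A's two full scans (with a redundant second condition) by a single pass that returns on an "all"+"loot" match and otherwise records the first "all time" index as a fallback.
import Mathlib
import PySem

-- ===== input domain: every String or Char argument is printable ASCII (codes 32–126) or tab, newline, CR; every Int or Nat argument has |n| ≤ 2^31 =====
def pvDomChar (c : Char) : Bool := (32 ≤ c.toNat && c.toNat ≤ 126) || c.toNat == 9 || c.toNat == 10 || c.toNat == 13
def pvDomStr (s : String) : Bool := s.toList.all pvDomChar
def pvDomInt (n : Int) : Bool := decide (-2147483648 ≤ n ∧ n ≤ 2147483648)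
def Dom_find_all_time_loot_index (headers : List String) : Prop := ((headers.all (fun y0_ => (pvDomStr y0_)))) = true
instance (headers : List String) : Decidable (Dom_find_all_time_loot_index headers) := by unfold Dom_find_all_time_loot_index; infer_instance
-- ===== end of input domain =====

-- B collapses A's two scans into one pass with a fallback index; same return value (objective: simpler).

-- ===== PORT A =====
def pvA_loop1 : List String → Int → Option Int
  | [], _ => none
  | h :: t, i =>
    if PySem.Str.isIn "all" h && PySem.Str.isIn "loot" h then some i
    else if PySem.Str.isIn "all time" h && PySem.Str.isIn "loot" h then some i
    else pvA_loop1 t (i + 1)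

def pvA_loop2 : List String → Int → Option Int
  | [], _ => none
  | h :: t, i =>
    if PySem.Str.isIn "all time" h || (PySem.Str.isIn "all" h && (PySem.Str.isIn "loot" h || PySem.Str.isIn "loots" h)) then some i
    else pvA_loop2 t (i + 1)

def find_all_time_loot_index (headers : List String) : Option Int :=
  match pvA_loop1 headers 0 with
  | some i => some i
  | none => pvA_loop2 headers 0

-- ===== PORT B =====
def pvB_loop : List String → Int → Option Int → Option Int
  | [], _, fb => fb
  | h :: t, i, fb =>
    if PySem.Str.isIn "all" h && PySem.Str.isIn "loot" h then some i
    else if fb.isNone && PySem.Str.isIn "all time" h then pvB_loop t (i + 1) (some i)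
    else pvB_loop t (i + 1) fb

def find_all_time_loot_index_alt (headers : List String) : Option Int :=
  pvB_loop headers 0 none

-- ===== PRECONDITION & SPEC =====
def Spec_find_all_time_loot_index (headers : List String) (out : Option Int) : Prop := out = find_all_time_loot_index_alt headers
instance (headers : List String) (out : Option Int) : Decidable (Spec_find_all_time_loot_index headers out) := by unfold Spec_find_all_time_loot_index; infer_instance

-- ===== CLAIM (what is proved, stated in full; the proofs are below) =====
def Claim_equal_find_all_time_loot_index : Prop := ∀ (headers : List String), Dom_find_all_time_loot_index headers → Spec_find_all_time_loot_index headers (find_all_time_loot_index headers)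

-- ===== LEMMAS AND PROOFS =====

-- "all time" in h implies "all" in h (substring transitivity).
theorem pv_allTime_imp_all (h : String) (hx : PySem.Str.isIn "all time" h = true) :
    PySem.Str.isIn "all" h = true := by
  rw [PySem.Str.isIn_iff_infix] at hx ⊢
  exact List.IsInfix.trans (by decide) hx

-- "loots" in h implies "loot" in h.
theorem pv_loots_imp_loot (h : String) (hx : PySem.Str.isIn "loots" h = true) :
    PySem.Str.isIn "loot" h = true := by
  rw [PySem.Str.isIn_iff_infix] at hx ⊢
  exact List.IsInfix.trans (by decide) hx

-- Once the fallback is set, B acts as loop1 with default j.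
theorem pvB_some (t : List String) (i j : Int) :
    pvB_loop t i (some j) = (match pvA_loop1 t i with | some k => some k | none => some j) := by
  induction t generalizing i with
  | nil => rfl
  | cons h t ih =>
    simp only [pvB_loop, pvA_loop1]
    by_cases h1 : (PySem.Str.isIn "all" h && PySem.Str.isIn "loot" h) = true
    · rw [if_pos h1, if_pos h1]
    · have h2 : (PySem.Str.isIn "all time" h && PySem.Str.isIn "loot" h) = false := by
        by_contra hc
        simp only [Bool.not_eq_false, Bool.and_eq_true] at hc
        exact h1 (by rw [pv_allTime_imp_all h hc.1, hc.2]; rfl)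
      rw [if_neg h1, if_neg h1,
        if_neg (show ¬ (((some j : Option Int).isNone && PySem.Str.isIn "all time" h) = true) by
          simp [Option.isNone]),
        if_neg (show ¬ ((PySem.Str.isIn "all time" h && PySem.Str.isIn "loot" h) = true) by
          rw [h2]; exact Bool.false_ne_true), ih]

theorem pvB_none (t : List String) (i : Int) :
    pvB_loop t i none = (match pvA_loop1 t i with | some k => some k | none => pvA_loop2 t i) := by
  induction t generalizing i with
  | nil => rfl
  | cons h t ih =>
    simp only [pvB_loop, pvA_loop1, pvA_loop2]
    by_cases h1 : (PySem.Str.isIn "all" h && PySem.Str.isIn "loot" h) = true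
    · rw [if_pos h1, if_pos h1]
    · have h1' := h1
      simp only [Bool.and_eq_true, not_and, Bool.not_eq_true] at h1'
      have h2 : ¬ ((PySem.Str.isIn "all time" h && PySem.Str.isIn "loot" h) = true) := by
        intro hc
        simp only [Bool.and_eq_true] at hc
        exact h1 (by rw [pv_allTime_imp_all h hc.1, hc.2]; rfl)
      rw [if_neg h1, if_neg h1, if_neg h2]
      by_cases hat : PySem.Str.isIn "all time" h = true
      · rw [if_pos (show ((none : Option Int).isNone && PySem.Str.isIn "all time" h) = true by
              rw [hat]; rfl),
          if_pos (show (PySem.Str.isIn "all time" h ||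
              (PySem.Str.isIn "all" h && (PySem.Str.isIn "loot" h || PySem.Str.isIn "loots" h))) = true by
              rw [hat]; rfl),
          pvB_some]
      · have hc2 : ¬ ((PySem.Str.isIn "all time" h ||
            (PySem.Str.isIn "all" h && (PySem.Str.isIn "loot" h || PySem.Str.isIn "loots" h))) = true) := by
          intro hc
          simp only [Bool.or_eq_true, Bool.and_eq_true] at hc
          rcases hc with hc | ⟨ha, hl⟩
          · exact hat hc
          · rcases hl with hl | hl
            · exact h1 (by rw [ha, hl]; rfl)
            · exact h1 (by rw [ha, pv_loots_imp_loot h hl]; rfl)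
        rw [if_neg (show ¬ (((none : Option Int).isNone && PySem.Str.isIn "all time" h) = true) by
              simp only [Option.isNone, Bool.true_and]; exact hat),
          if_neg hc2, ih]

-- ===== VERDICT (by name: the statement is the Claim_ definition above) =====
theorem find_all_time_loot_index_spec : Claim_equal_find_all_time_loot_index := by
  intro headers _
  unfold Spec_find_all_time_loot_index find_all_time_loot_index find_all_time_loot_index_alt
  rw [pvB_none]
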